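-- pv_equiv track=rewrite | github.com/anacardells/Codility | Pi_code_challenge/Solution.py | solution
-- ===== SOURCE A (Python) =====
-- def reduce_size(P, Q):
--     pair_list = []
--     P_short = ''
--     Q_short = ''
--     for i in range(len(P)):
--         set_i = set([P[i], Q[i]])
--         if set_i not in pair_list:
--             pair_list.append(set_i)
--             P_short += P[i]
--             Q_short += Q[i]
--     return P_short, Q_short
--
-- def insert_letter(string, letter):
--     """
--     Inserts a letter in an ordered string using binary search
--     """
--     low = 0
--     high = len(string) - 1
--     while low <= high:
--         mid = (low + high) // 2
--         if letter < string[mid]: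
--             high = mid - 1
--         elif letter > string[mid]:
--             low = mid + 1
--         else:
--             return string[:mid] + letter + string[mid:]
--     return string[:low] + letter + string[low:]
--
-- def solution(P, Q):
--     P, Q = reduce_size(P, Q)
--     memo_new = {}
--     memo_new[P[0]] = 1
--     memo_new[Q[0]] = 1
--     for i in range(1, len(P)):
--         memo = memo_new
--         memo_new = {}
--         for key, value in memo.items():
--             if (P[i] in key) or (Q[i] in key):
--                 memo_new[key] = value
--             if P[i] not in key:
--                 key_p = insert_letter(key, P[i])
--                 memo_new[key_p] = value + 1
--             if ((P[i] != Q[i]) and (Q[i] not in key)):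
--                 key_q = insert_letter(key, Q[i])
--                 memo_new[key_q] = value + 1
--     return min(memo_new.values())
-- ===== SOURCE B (Python) =====
-- def solution(P, Q):
--     # Minimum vertex cover over the distinct letter-pair edges, by branching recursion.
--     edges = []
--     for i in range(len(P)):
--         p, q = P[i], Q[i]
--         if (p, q) not in edges and (q, p) not in edges:
--             edges.append((p, q))
--
--     def mvc(es, chosen):
--         if not es:
--             return len(chosen)
--         (p, q), rest = es[0], es[1:]
--         if p in chosen or q in chosen:
--             return mvc(rest, chosen)
--         best = mvc(rest, chosen | {p})
--         if p != q:
--             best = min(best, mvc(rest, chosen | {q}))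
--         return best
--
--     return mvc(edges, frozenset())
-- ===== Notes on version B (the rewrite author's own statement) =====
-- stated objective: alternative
-- what changed: Replaces the level-by-level dictionary DP over sorted-string letter-set keys (with binary-search insertion) by a minimum-vertex-cover branching recursion over the deduplicated edge list that branches on the two endpoints of the first uncovered edge.
import Mathlib
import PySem

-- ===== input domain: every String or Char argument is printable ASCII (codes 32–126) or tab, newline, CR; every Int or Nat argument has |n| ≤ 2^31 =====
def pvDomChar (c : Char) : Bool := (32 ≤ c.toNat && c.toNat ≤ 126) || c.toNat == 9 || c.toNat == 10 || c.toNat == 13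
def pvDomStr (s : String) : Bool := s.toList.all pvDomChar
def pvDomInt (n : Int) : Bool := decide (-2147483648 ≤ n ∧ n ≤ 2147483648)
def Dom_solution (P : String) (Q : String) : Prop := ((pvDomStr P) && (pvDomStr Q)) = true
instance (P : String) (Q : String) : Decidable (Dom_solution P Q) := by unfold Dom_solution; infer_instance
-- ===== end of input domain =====

-- B replaces A's level-by-level dict DP over sorted letter-set string keys by a
-- minimum-vertex-cover branching recursion over the deduplicated edge list (objective:
-- alternative, same exponential worst case).

-- ===== PORT A =====

-- while-loop of insert_letter; s[mid] via the total pyGetD (always in range when called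
-- by A, since low/high stay inside the string).
def insertLetterLoop (s : List Char) (letter : Char) (low high : Int) : List Char :=
  if h : low ≤ high then
    let mid := PySem.Int.floordiv (low + high) 2
    let c := PySem.List.pyGetD s mid ' '
    if letter < c then insertLetterLoop s letter low (mid - 1)
    else if c < letter then insertLetterLoop s letter (mid + 1) high
    else PySem.List.slice s none (some mid) ++ letter :: PySem.List.slice s (some mid) none
  else PySem.List.slice s none (some low) ++ letter :: PySem.List.slice s (some low) none
termination_by (high + 1 - low).toNat
decreasing_by
  · have := PySem.Int.floordiv_two_mid_bounds h; omega
  · have := PySem.Int.floordiv_two_mid_bounds h; omega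

def insertLetter (s : List Char) (letter : Char) : List Char :=
  insertLetterLoop s letter 0 ((s.length : Int) - 1)

-- reduce_size's 'for i in range(len(P))' reading P[i], Q[i]: simultaneous structural
-- recursion on the two character lists; the second branch is where Python raises
-- IndexError (Q exhausted before P), excluded by Pre_solution.
def reduceLoop : List Char → List Char → List (PySem.Set Char) → List Char → List Char →
    List Char × List Char
  | [], _, _, ps, qs => (ps, qs)
  | _ :: _, [], _, ps, qs => (ps, qs)
  | p :: pr, q :: qr, pl, ps, qs =>
    let si : PySem.Set Char := PySem.Set.ofList [p, q]
    if pl.any (fun s => PySem.Set.equal s si) then reduceLoop pr qr pl ps qs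
    else reduceLoop pr qr (pl ++ [si]) (ps ++ [p]) (qs ++ [q])

-- body of 'for key, value in memo.items(): …' (three independent ifs, as in A)
def stepFn (p q : Char) (mn : PySem.Dict (List Char) Int) (kv : List Char × Int) :
    PySem.Dict (List Char) Int :=
  let mn := if p ∈ kv.1 ∨ q ∈ kv.1 then mn.insert kv.1 kv.2 else mn
  let mn := if p ∉ kv.1 then mn.insert (insertLetter kv.1 p) (kv.2 + 1) else mn
  if p ≠ q ∧ q ∉ kv.1 then mn.insert (insertLetter kv.1 q) (kv.2 + 1) else mn

-- 'for i in range(1, len(P))' over the reduced strings, as recursion on the remaining pairs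
def solutionLoop : List (Char × Char) → PySem.Dict (List Char) Int → PySem.Dict (List Char) Int
  | [], memoNew => memoNew
  | (p, q) :: rest, memo =>
    solutionLoop rest (memo.items.foldl (stepFn p q) PySem.Dict.empty)

def solution (P : String) (Q : String) : Int :=
  let r := reduceLoop P.toList Q.toList [] [] []
  match r.1.zip r.2 with
  | [] => 0        -- Python raises IndexError (P[0] of the empty reduced string); excluded by Pre_solution
  | (p0, q0) :: rest =>
    let memo := (PySem.Dict.empty.insert [p0] (1 : Int)).insert [q0] 1
    (PySem.List.min? (solutionLoop rest memo).values (fun v => v)).getD 0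

-- ===== PORT B =====

-- B's 'for i in range(len(P)): p, q = P[i], Q[i]' edge-building loop; the mismatched
-- case (P left, Q exhausted) is where B's Python raises IndexError, excluded by Pre_solution.
def buildEdges : List Char → List Char → List (Char × Char) → List (Char × Char)
  | [], _, acc => acc
  | _ :: _, [], acc => acc
  | p :: pr, q :: qr, acc =>
    if (p, q) ∈ acc ∨ (q, p) ∈ acc then buildEdges pr qr acc
    else buildEdges pr qr (acc ++ [(p, q)])

def mvcRec : List (Char × Char) → PySem.Set Char → Int
  | [], chosen => (chosen.length : Int)
  | (p, q) :: rest, chosen =>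
    if p ∈ chosen ∨ q ∈ chosen then mvcRec rest chosen
    else
      let best := mvcRec rest (PySem.Set.add chosen p)
      if p ≠ q then min best (mvcRec rest (PySem.Set.add chosen q)) else best

def solution_alt (P : String) (Q : String) : Int :=
  mvcRec (buildEdges P.toList Q.toList []) PySem.Set.empty

-- ===== PRECONDITION & SPEC =====
-- Exactly the inputs on which the Python A returns: P nonempty (else P[0] raises
-- IndexError) and Q at least as long as P (else Q[i] raises IndexError).
def Pre_solution (P : String) (Q : String) : Prop :=
  P.toList ≠ [] ∧ P.toList.length ≤ Q.toList.length

instance (P : String) (Q : String) : Decidable (Pre_solution P Q) := by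
  unfold Pre_solution; infer_instance

def pvWitness_solution : String × String := ("ab", "bc")

def Spec_solution (P : String) (Q : String) (out : Int) : Prop := out = solution_alt P Q
instance (P : String) (Q : String) (out : Int) : Decidable (Spec_solution P Q out) := by
  unfold Spec_solution; infer_instance

-- ===== CLAIM (what is proved, stated in full; the proofs are below) =====
def Claim_equal_solution : Prop := ∀ (P : String) (Q : String), Dom_solution P Q →
  Pre_solution P Q → Spec_solution P Q (solution P Q)

-- ===== LEMMAS AND PROOFS =====

-- proof-side view of B's edge loop over the zipped pairs (equal to buildEdges since
-- zip truncates exactly where buildEdges stops)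
def dedupLoop : List (Char × Char) → List (Char × Char) → List (Char × Char)
  | [], acc => acc
  | (p, q) :: rest, acc =>
    if (p, q) ∈ acc ∨ (q, p) ∈ acc then dedupLoop rest acc
    else dedupLoop rest (acc ++ [(p, q)])

theorem buildEdges_eq_dedup (ps : List Char) :
    ∀ (qs : List Char) (acc : List (Char × Char)),
      buildEdges ps qs acc = dedupLoop (ps.zip qs) acc := by
  induction ps with
  | nil => intro qs acc; simp [buildEdges, dedupLoop]
  | cons p pr ih =>
    intro qs acc
    cases qs with
    | nil => simp [buildEdges, dedupLoop]
    | cons q qr =>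
      rw [List.zip_cons_cons]
      simp only [buildEdges, dedupLoop]
      split_ifs <;> exact ih qr _

-- C covers every edge of es
def Covers (C : List Char) (es : List (Char × Char)) : Prop :=
  ∀ e ∈ es, e.1 ∈ C ∨ e.2 ∈ C

theorem covers_mono {C C' : List Char} {es : List (Char × Char)}
    (h : Covers C es) (hs : C ⊆ C') : Covers C' es := by
  intro e he; rcases h e he with h1 | h1
  · exact Or.inl (hs h1)
  · exact Or.inr (hs h1)

theorem covers_append {C : List Char} {es fs : List (Char × Char)} :
    Covers C (es ++ fs) ↔ Covers C es ∧ Covers C fs := by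
  constructor
  · intro h; exact ⟨fun e he => h e (List.mem_append_left _ he),
      fun e he => h e (List.mem_append_right _ he)⟩
  · rintro ⟨h1, h2⟩ e he
    rcases List.mem_append.1 he with he | he
    · exact h1 e he
    · exact h2 e he

theorem nodup_length_le {l C : List Char} (hl : l.Nodup) (hs : l ⊆ C) :
    l.length ≤ C.length := by
  calc l.length = l.toFinset.card := (List.toFinset_card_of_nodup hl).symm
    _ ≤ C.toFinset.card := Finset.card_le_card
        (fun x hx => List.mem_toFinset.2 (hs (List.mem_toFinset.1 hx)))
    _ ≤ C.length := C.toFinset_card_le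

theorem slice_to_append_from (s : List Char) (k : Int) :
    PySem.List.slice s none (some k) ++ PySem.List.slice s (some k) none = s := by
  by_cases hk : 0 ≤ k
  · rw [PySem.List.slice_to s hk, PySem.List.slice_from s hk, List.take_append_drop]
  · have h1 : 0 < k.natAbs := by omega
    have h2 : k = -((k.natAbs : Nat) : Int) := by omega
    rw [h2, PySem.List.slice_to_neg_natCast s k.natAbs h1,
      PySem.List.slice_from_neg_natCast s k.natAbs h1, List.take_append_drop]

theorem insertLetterLoop_eq (s : List Char) (letter : Char) (low high : Int) :
    ∃ k : Int,
      insertLetterLoop s letter low high =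
        PySem.List.slice s none (some k) ++ letter :: PySem.List.slice s (some k) none := by
  fun_induction insertLetterLoop s letter low high with
  | case1 low high h mid c hlt ih => exact ih
  | case2 low high h mid c hlt hgt ih => exact ih
  | case3 low high h mid c hlt hgt => exact ⟨mid, rfl⟩
  | case4 low high h => exact ⟨low, rfl⟩

theorem insertLetter_perm (s : List Char) (letter : Char) :
    (insertLetter s letter).Perm (letter :: s) := by
  obtain ⟨k, hk⟩ := insertLetterLoop_eq s letter 0 ((s.length : Int) - 1)
  unfold insertLetter
  rw [hk]
  refine List.Perm.trans List.perm_middle ?_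
  rw [slice_to_append_from]

theorem insertLetter_length (s : List Char) (c : Char) :
    (insertLetter s c).length = s.length + 1 := by
  have := (insertLetter_perm s c).length_eq; simpa using this

theorem mem_insertLetter {s : List Char} {c x : Char} :
    x ∈ insertLetter s c ↔ x = c ∨ x ∈ s := by
  rw [(insertLetter_perm s c).mem_iff]; simp

theorem insertLetter_nodup {s : List Char} {c : Char} (hs : s.Nodup) (hc : c ∉ s) :
    (insertLetter s c).Nodup := by
  rw [(insertLetter_perm s c).nodup_iff]; exact List.nodup_cons.2 ⟨hc, hs⟩

-- ---- B characterization ----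

theorem add_subset {chosen C : List Char} {p : Char} (hs : chosen ⊆ C) (hp : p ∈ C) :
    (PySem.Set.add chosen p : List Char) ⊆ C := by
  intro x hx
  rcases (PySem.Set.mem_add _ _ _).1 hx with h | h
  · exact hs h
  · exact h ▸ hp

theorem subset_add {chosen : List Char} {p : Char} :
    chosen ⊆ (PySem.Set.add chosen p : List Char) := by
  intro x hx; exact (PySem.Set.mem_add _ _ _).2 (Or.inl hx)

theorem mvc_le (es : List (Char × Char)) :
    ∀ chosen C : List Char, chosen.Nodup → C.Nodup → Covers C es → chosen ⊆ C →
      mvcRec es chosen ≤ (C.length : Int) := by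
  induction es with
  | nil =>
    intro chosen C h1 _ _ hsub
    simp only [mvcRec]
    exact_mod_cast nodup_length_le h1 hsub
  | cons e rest ih =>
    obtain ⟨p, q⟩ := e
    intro chosen C h1 h2 hcov hsub
    have hcr : Covers C rest := fun e he => hcov e (List.mem_cons_of_mem _ he)
    have hpq : p ∈ C ∨ q ∈ C := hcov (p, q) List.mem_cons_self
    simp only [mvcRec]
    by_cases hmem : p ∈ chosen ∨ q ∈ chosen
    · rw [if_pos hmem]; exact ih chosen C h1 h2 hcr hsub
    · rw [if_neg hmem]
      by_cases hne : p ≠ q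
      · rw [if_pos hne]
        rcases hpq with hp | hq
        · exact le_trans (min_le_left _ _)
            (ih _ C (PySem.Set.nodup_add _ _ h1) h2 hcr (add_subset hsub hp))
        · exact le_trans (min_le_right _ _)
            (ih _ C (PySem.Set.nodup_add _ _ h1) h2 hcr (add_subset hsub hq))
      · rw [if_neg hne]
        push_neg at hne
        have hp : p ∈ C := by rcases hpq with h | h; exact h; exact hne ▸ h
        exact ih _ C (PySem.Set.nodup_add _ _ h1) h2 hcr (add_subset hsub hp)

theorem mvc_exists (es : List (Char × Char)) :
    ∀ chosen : List Char, chosen.Nodup →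
      ∃ C : List Char, C.Nodup ∧ chosen ⊆ C ∧ Covers C es ∧
        mvcRec es chosen = (C.length : Int) := by
  induction es with
  | nil =>
    intro chosen h1
    exact ⟨chosen, h1, List.Subset.refl _, fun e he => absurd he (List.not_mem_nil), by
      simp only [mvcRec]⟩
  | cons e rest ih =>
    obtain ⟨p, q⟩ := e
    intro chosen h1
    by_cases hmem : p ∈ chosen ∨ q ∈ chosen
    · obtain ⟨C, hC1, hC2, hC3, hC4⟩ := ih chosen h1
      refine ⟨C, hC1, hC2, ?_, ?_⟩
      · intro e he
        rcases List.mem_cons.1 he with rfl | he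
        · rcases hmem with h | h
          · exact Or.inl (hC2 h)
          · exact Or.inr (hC2 h)
        · exact hC3 e he
      · simp only [mvcRec]; rw [if_pos hmem]; exact hC4
    · by_cases hne : p ≠ q
      · obtain ⟨C1, h11, h12, h13, h14⟩ := ih (PySem.Set.add chosen p) (PySem.Set.nodup_add _ _ h1)
        obtain ⟨C2, h21, h22, h23, h24⟩ := ih (PySem.Set.add chosen q) (PySem.Set.nodup_add _ _ h1)
        rcases le_total (mvcRec rest (PySem.Set.add chosen p))
            (mvcRec rest (PySem.Set.add chosen q)) with hle | hle
        · refine ⟨C1, h11, List.Subset.trans subset_add h12, ?_, ?_⟩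
          · intro e he
            rcases List.mem_cons.1 he with rfl | he
            · exact Or.inl (h12 ((PySem.Set.mem_add _ _ _).2 (Or.inr rfl)))
            · exact h13 e he
          · simp only [mvcRec]; rw [if_neg hmem, if_pos hne]
            rw [min_eq_left hle]; exact h14
        · refine ⟨C2, h21, List.Subset.trans subset_add h22, ?_, ?_⟩
          · intro e he
            rcases List.mem_cons.1 he with rfl | he
            · exact Or.inr (h22 ((PySem.Set.mem_add _ _ _).2 (Or.inr rfl)))
            · exact h23 e he
          · simp only [mvcRec]; rw [if_neg hmem, if_pos hne]
            rw [min_eq_right hle]; exact h24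
      · obtain ⟨C1, h11, h12, h13, h14⟩ := ih (PySem.Set.add chosen p) (PySem.Set.nodup_add _ _ h1)
        push_neg at hne
        refine ⟨C1, h11, List.Subset.trans subset_add h12, ?_, ?_⟩
        · intro e he
          rcases List.mem_cons.1 he with rfl | he
          · exact Or.inl (h12 ((PySem.Set.mem_add _ _ _).2 (Or.inr rfl)))
          · exact h13 e he
        · simp only [mvcRec]; rw [if_neg hmem, if_neg (by simp [hne])]; exact h14

-- ---- A invariant ----

def GoodItem (done : List (Char × Char)) (kv : List Char × Int) : Prop :=
  kv.2 = (kv.1.length : Int) ∧ kv.1.Nodup ∧ Covers kv.1 done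

def MemoInv (memo : PySem.Dict (List Char) Int) (done : List (Char × Char)) : Prop :=
  (∀ kv ∈ memo.items, GoodItem done kv) ∧
  (∀ C : List Char, C.Nodup → Covers C done → ∃ kv ∈ memo.items, kv.1 ⊆ C)

theorem items_insert_pres {d : PySem.Dict (List Char) Int} {P : List Char × Int → Prop}
    (hd : ∀ x ∈ d.items, P x) {k : List Char} {v : Int} (hkv : P (k, v)) :
    ∀ x ∈ (d.insert k v).items, P x := by
  intro x hx
  rcases (PySem.Dict.mem_items_insert _ _ _ _).1 hx with rfl | ⟨hx', _⟩
  · exact hkv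
  · exact hd x hx'

theorem items_ite_insert_pres {d : PySem.Dict (List Char) Int} {P : List Char × Int → Prop}
    (c : Prop) [Decidable c] (hd : ∀ x ∈ d.items, P x) {k : List Char} {v : Int}
    (hkv : c → P (k, v)) :
    ∀ x ∈ (if c then d.insert k v else d).items, P x := by
  split_ifs with hc
  · exact items_insert_pres hd (hkv hc)
  · exact hd

theorem stepFn_items_good (p q : Char) (done : List (Char × Char))
    (mn : PySem.Dict (List Char) Int) (kv : List Char × Int)
    (hmn : ∀ x ∈ mn.items, GoodItem (done ++ [(p, q)]) x) (hkv : GoodItem done kv) :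
    ∀ x ∈ (stepFn p q mn kv).items, GoodItem (done ++ [(p, q)]) x := by
  obtain ⟨k, v⟩ := kv
  obtain ⟨hv, hnd, hcov⟩ := hkv
  simp only at hv hnd hcov
  unfold stepFn
  refine items_ite_insert_pres _ (items_ite_insert_pres _ (items_ite_insert_pres _ hmn ?_) ?_) ?_
  · -- (k, v) kept: k covers the new edge by the condition
    intro h1
    refine ⟨hv, hnd, covers_append.2 ⟨hcov, ?_⟩⟩
    intro e he
    rcases List.mem_cons.1 he with rfl | he
    · exact h1
    · exact absurd he (List.not_mem_nil)
  · -- key_p = insertLetter k p with value v + 1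
    intro h2
    refine ⟨?_, insertLetter_nodup hnd h2, covers_append.2 ⟨?_, ?_⟩⟩
    · simp only [insertLetter_length, hv]; push_cast; ring
    · exact covers_mono hcov (fun x hx => mem_insertLetter.2 (Or.inr hx))
    · intro e he
      rcases List.mem_cons.1 he with rfl | he
      · exact Or.inl (mem_insertLetter.2 (Or.inl rfl))
      · exact absurd he (List.not_mem_nil)
  · -- key_q = insertLetter k q with value v + 1
    rintro ⟨_, h3⟩
    refine ⟨?_, insertLetter_nodup hnd h3, covers_append.2 ⟨?_, ?_⟩⟩
    · simp only [insertLetter_length, hv]; push_cast; ring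
    · exact covers_mono hcov (fun x hx => mem_insertLetter.2 (Or.inr hx))
    · intro e he
      rcases List.mem_cons.1 he with rfl | he
      · exact Or.inr (mem_insertLetter.2 (Or.inl rfl))
      · exact absurd he (List.not_mem_nil)

theorem foldl_step_good (p q : Char) (done : List (Char × Char))
    (l : List (List Char × Int)) :
    ∀ d : PySem.Dict (List Char) Int, (∀ x ∈ d.items, GoodItem (done ++ [(p, q)]) x) →
      (∀ kv ∈ l, GoodItem done kv) →
      ∀ x ∈ (l.foldl (stepFn p q) d).items, GoodItem (done ++ [(p, q)]) x := by
  induction l with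
  | nil => intro d hd _; exact hd
  | cons kv t ih =>
    intro d hd hl
    exact ih _ (stepFn_items_good p q done d kv hd (hl kv List.mem_cons_self))
      (fun x hx => hl x (List.mem_cons_of_mem _ hx))

def HasKeySub (d : PySem.Dict (List Char) Int) (C : List Char) : Prop :=
  ∃ kv ∈ d.items, kv.1 ⊆ C

theorem hasKeySub_insert_self {d : PySem.Dict (List Char) Int} {C k : List Char} {v : Int}
    (h : k ⊆ C) : HasKeySub (d.insert k v) C :=
  ⟨(k, v), PySem.Dict.mem_items_insert_self _ _ _, h⟩

theorem hasKeySub_insert {d : PySem.Dict (List Char) Int} {C k : List Char} {v : Int}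
    (h : HasKeySub d C) : HasKeySub (d.insert k v) C := by
  obtain ⟨kv, hkv, hsub⟩ := h
  by_cases hk : kv.1 = k
  · exact hasKeySub_insert_self (hk ▸ hsub)
  · exact ⟨kv, (PySem.Dict.mem_items_insert _ _ _ _).2 (Or.inr ⟨hkv, hk⟩), hsub⟩

theorem hasKeySub_ite_insert {d : PySem.Dict (List Char) Int} {C k : List Char} {v : Int}
    (c : Prop) [Decidable c] (h : HasKeySub d C) :
    HasKeySub (if c then d.insert k v else d) C := by
  split_ifs with hc
  · exact hasKeySub_insert h
  · exact h

theorem stepFn_hasKeySub_mono {p q : Char} {mn : PySem.Dict (List Char) Int}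
    {kv : List Char × Int} {C : List Char} (h : HasKeySub mn C) :
    HasKeySub (stepFn p q mn kv) C := by
  unfold stepFn
  exact hasKeySub_ite_insert _ (hasKeySub_ite_insert _ (hasKeySub_ite_insert _ h))

theorem stepFn_adds (p q : Char) (C : List Char) (mn : PySem.Dict (List Char) Int)
    (kv : List Char × Int) (hC : p ∈ C ∨ q ∈ C) (hsub : kv.1 ⊆ C) :
    HasKeySub (stepFn p q mn kv) C := by
  obtain ⟨k, v⟩ := kv
  simp only at hsub
  unfold stepFn
  by_cases h1 : p ∈ k ∨ q ∈ k
  · refine hasKeySub_ite_insert _ (hasKeySub_ite_insert _ ?_)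
    rw [if_pos h1]
    exact hasKeySub_insert_self hsub
  · push_neg at h1
    have hkeyp : p ∈ C → (insertLetter k p : List Char) ⊆ C := by
      intro hp x hx
      rcases mem_insertLetter.1 hx with rfl | hx
      · exact hp
      · exact hsub hx
    have hkeyq : q ∈ C → (insertLetter k q : List Char) ⊆ C := by
      intro hq x hx
      rcases mem_insertLetter.1 hx with rfl | hx
      · exact hq
      · exact hsub hx
    rcases hC with hp | hq
    · refine hasKeySub_ite_insert _ ?_
      rw [if_pos h1.1]
      exact hasKeySub_insert_self (hkeyp hp)
    · by_cases hpq : p = q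
      · refine hasKeySub_ite_insert _ ?_
        rw [if_pos h1.1]
        exact hasKeySub_insert_self (hkeyp (hpq ▸ hq))
      · rw [if_pos ⟨hpq, h1.2⟩]
        exact hasKeySub_insert_self (hkeyq hq)

theorem foldl_step_exists (p q : Char) (C : List Char) (hC : p ∈ C ∨ q ∈ C)
    (l : List (List Char × Int)) :
    ∀ d : PySem.Dict (List Char) Int,
      (HasKeySub d C ∨ ∃ kv ∈ l, kv.1 ⊆ C) → HasKeySub (l.foldl (stepFn p q) d) C := by
  induction l with
  | nil =>
    intro d h
    rcases h with h | ⟨kv, hkv, _⟩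
    · exact h
    · exact absurd hkv (List.not_mem_nil)
  | cons kv t ih =>
    intro d h
    rcases h with h | ⟨kv', hkv', hsub⟩
    · exact ih _ (Or.inl (stepFn_hasKeySub_mono h))
    · rcases List.mem_cons.1 hkv' with rfl | hmem
      · exact ih _ (Or.inl (stepFn_adds p q C d kv' hC hsub))
      · exact ih _ (Or.inr ⟨kv', hmem, hsub⟩)

theorem items_empty_nil :
    (PySem.Dict.empty : PySem.Dict (List Char) Int).items = [] := rfl

theorem inv_step (p q : Char) (memo : PySem.Dict (List Char) Int)
    (done : List (Char × Char)) (h : MemoInv memo done) :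
    MemoInv (memo.items.foldl (stepFn p q) PySem.Dict.empty) (done ++ [(p, q)]) := by
  obtain ⟨hgood, hex⟩ := h
  constructor
  · exact foldl_step_good p q done memo.items PySem.Dict.empty
      (by rw [items_empty_nil]; intro x hx; exact absurd hx (List.not_mem_nil)) hgood
  · intro C hnd hcov
    obtain ⟨hc1, hc2⟩ := covers_append.1 hcov
    obtain ⟨kv, hkv, hsub⟩ := hex C hnd hc1
    have hC : p ∈ C ∨ q ∈ C := hc2 (p, q) List.mem_cons_self
    exact foldl_step_exists p q C hC memo.items PySem.Dict.empty (Or.inr ⟨kv, hkv, hsub⟩)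

theorem inv_loop (rest : List (Char × Char)) :
    ∀ memo done, MemoInv memo done → MemoInv (solutionLoop rest memo) (done ++ rest) := by
  induction rest with
  | nil => intro memo done h; simpa [solutionLoop] using h
  | cons e t ih =>
    obtain ⟨p, q⟩ := e
    intro memo done h
    have h2 := inv_step p q memo done h
    have h3 := ih _ (done ++ [(p, q)]) h2
    simpa [solutionLoop, List.append_assoc] using h3

theorem inv_init (p0 q0 : Char) :
    MemoInv ((PySem.Dict.empty.insert [p0] (1 : Int)).insert [q0] 1) [(p0, q0)] := by
  constructor
  · intro kv hkv
    rcases (PySem.Dict.mem_items_insert _ _ _ _).1 hkv with rfl | ⟨hkv2, _⟩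
    · exact ⟨by simp, List.nodup_singleton _, by
        intro e he
        rcases List.mem_cons.1 he with rfl | he
        · exact Or.inr (List.mem_singleton.2 rfl)
        · exact absurd he (List.not_mem_nil)⟩
    · rcases (PySem.Dict.mem_items_insert _ _ _ _).1 hkv2 with rfl | ⟨hkv3, _⟩
      · exact ⟨by simp, List.nodup_singleton _, by
          intro e he
          rcases List.mem_cons.1 he with rfl | he
          · exact Or.inl (List.mem_singleton.2 rfl)
          · exact absurd he (List.not_mem_nil)⟩
      · rw [items_empty_nil] at hkv3; exact absurd hkv3 (List.not_mem_nil)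
  · intro C _ hcov
    have hpq : p0 ∈ C ∨ q0 ∈ C := hcov (p0, q0) List.mem_cons_self
    by_cases hq : q0 = p0
    · refine ⟨([q0], 1), PySem.Dict.mem_items_insert_self _ _ _, ?_⟩
      intro x hx
      rw [List.mem_singleton.1 hx, hq]
      rcases hpq with h | h
      · exact h
      · exact hq ▸ h
    · rcases hpq with h | h
      · refine ⟨([p0], 1), (PySem.Dict.mem_items_insert _ _ _ _).2
          (Or.inr ⟨PySem.Dict.mem_items_insert_self _ _ _, by simp [hq]; exact fun hh => hq hh.symm⟩), ?_⟩
        intro x hx; rw [List.mem_singleton.1 hx]; exact h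
      · refine ⟨([q0], 1), PySem.Dict.mem_items_insert_self _ _ _, ?_⟩
        intro x hx; rw [List.mem_singleton.1 hx]; exact h

-- ---- the two deduplications produce the same edge list ----

theorem pair_set_eq (a b p q : Char) :
    (PySem.Set.equal (PySem.Set.ofList [a, b]) (PySem.Set.ofList [p, q]) = true) ↔
      ((a, b) = (p, q) ∨ (a, b) = (q, p)) := by
  rw [PySem.Set.equal_iff]
  constructor
  · intro h
    have ha := (h a).1 (by rw [PySem.Set.mem_ofList]; simp)
    have hb := (h b).1 (by rw [PySem.Set.mem_ofList]; simp)
    have hq := (h q).2 (by rw [PySem.Set.mem_ofList]; simp)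
    rw [PySem.Set.mem_ofList] at ha hb hq
    simp only [List.mem_cons, List.not_mem_nil, or_false] at ha hb hq
    rcases ha with rfl | rfl <;> rcases hb with h2 | h2 <;> simp_all
  · intro h x
    rw [PySem.Set.mem_ofList, PySem.Set.mem_ofList]
    rw [Prod.mk.injEq, Prod.mk.injEq] at h
    rcases h with ⟨rfl, rfl⟩ | ⟨rfl, rfl⟩
    · rfl
    · simp only [List.mem_cons, List.not_mem_nil, or_false]
      tauto

theorem reduce_eq_dedup (ps : List Char) :
    ∀ (qs : List Char) (acc : List (Char × Char)) (psh qsh : List Char),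
      psh.length = qsh.length → psh.zip qsh = acc →
      (reduceLoop ps qs (acc.map (fun e => PySem.Set.ofList [e.1, e.2])) psh qsh).1.zip
        (reduceLoop ps qs (acc.map (fun e => PySem.Set.ofList [e.1, e.2])) psh qsh).2 =
      dedupLoop (ps.zip qs) acc := by
  induction ps with
  | nil => intro qs acc psh qsh _ hz; simp [reduceLoop, dedupLoop, hz]
  | cons p pr ih =>
    intro qs acc psh qsh hlen hz
    cases qs with
    | nil => simp [reduceLoop, dedupLoop, hz]
    | cons q qr =>
      have hcond : ((acc.map (fun e => PySem.Set.ofList [e.1, e.2])).any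
          (fun s => PySem.Set.equal s (PySem.Set.ofList [p, q])) = true) ↔
          ((p, q) ∈ acc ∨ (q, p) ∈ acc) := by
        rw [List.any_eq_true]
        constructor
        · rintro ⟨x, hx, hex⟩
          obtain ⟨e, he, rfl⟩ := List.mem_map.1 hx
          obtain ⟨e1, e2⟩ := e
          rcases (pair_set_eq e1 e2 p q).1 hex with h | h
          · rw [Prod.mk.injEq] at h; obtain ⟨rfl, rfl⟩ := h; exact Or.inl he
          · rw [Prod.mk.injEq] at h; obtain ⟨rfl, rfl⟩ := h; exact Or.inr he
        · intro h
          rcases h with h | h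
          · exact ⟨_, List.mem_map_of_mem h, by
              rw [pair_set_eq]; exact Or.inl rfl⟩
          · exact ⟨_, List.mem_map_of_mem h, by
              rw [pair_set_eq]; exact Or.inr rfl⟩
      rw [List.zip_cons_cons]
      simp only [reduceLoop, dedupLoop]
      by_cases hc : (p, q) ∈ acc ∨ (q, p) ∈ acc
      · rw [if_pos (hcond.2 hc), if_pos hc]
        exact ih qr acc psh qsh hlen hz
      · rw [if_neg (fun hh => hc (hcond.1 hh)), if_neg hc]
        have hmap : (acc.map (fun e => PySem.Set.ofList [e.1, e.2])) ++
            [PySem.Set.ofList [p, q]] =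
            (acc ++ [(p, q)]).map (fun e => PySem.Set.ofList [e.1, e.2]) := by
          rw [List.map_append]; rfl
        rw [hmap]
        refine ih qr (acc ++ [(p, q)]) (psh ++ [p]) (qsh ++ [q]) (by simp [hlen]) ?_
        rw [List.zip_append hlen, hz]; rfl

theorem mem_dedupLoop (ps : List (Char × Char)) :
    ∀ (acc : List (Char × Char)) (e : Char × Char), e ∈ acc → e ∈ dedupLoop ps acc := by
  induction ps with
  | nil => intro acc e he; simpa [dedupLoop] using he
  | cons x t ih =>
    obtain ⟨p, q⟩ := x
    intro acc e he
    simp only [dedupLoop]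
    split_ifs
    · exact ih acc e he
    · exact ih _ e (List.mem_append_left _ he)

-- ===== VERDICT (by name: the statement is the Claim_ definition above) =====
theorem solution_spec : Claim_equal_solution := by
  unfold Claim_equal_solution
  intro P Q _ hpre
  unfold Spec_solution
  obtain ⟨hne, hlen⟩ := hpre
  obtain ⟨p, pt, hP⟩ : ∃ p pt, P.toList = p :: pt := by
    cases hPL : P.toList with
    | nil => exact absurd hPL hne
    | cons a b => exact ⟨a, b, rfl⟩
  obtain ⟨qc, qt, hQ⟩ : ∃ qc qt, Q.toList = qc :: qt := by
    cases hQL : Q.toList with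
    | nil => rw [hP, hQL] at hlen; simp at hlen
    | cons a b => exact ⟨a, b, rfl⟩
  have hmem0 : (p, qc) ∈ dedupLoop (P.toList.zip Q.toList) [] := by
    rw [hP, hQ, List.zip_cons_cons]
    simp only [dedupLoop]
    rw [if_neg (by simp)]
    exact mem_dedupLoop _ _ _ (by simp)
  have hred := reduce_eq_dedup P.toList Q.toList [] [] [] rfl rfl
  simp only [List.map_nil] at hred
  simp only [solution, solution_alt]
  rw [hred, buildEdges_eq_dedup]
  cases hEc : dedupLoop (P.toList.zip Q.toList) [] with
  | nil => rw [hEc] at hmem0; exact absurd hmem0 (List.not_mem_nil)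
  | cons e0 rest =>
    obtain ⟨p0, q0⟩ := e0
    show (PySem.List.min?
        (solutionLoop rest ((PySem.Dict.empty.insert [p0] (1 : Int)).insert [q0] 1)).values
        (fun v => v)).getD 0 = mvcRec ((p0, q0) :: rest) PySem.Set.empty
    have hinv := inv_loop rest _ [(p0, q0)] (inv_init p0 q0)
    obtain ⟨hgood, hex⟩ := hinv
    have hdone : ([(p0, q0)] : List (Char × Char)) ++ rest = (p0, q0) :: rest := rfl
    rw [hdone] at hgood hex
    set memoF := solutionLoop rest ((PySem.Dict.empty.insert [p0] (1 : Int)).insert [q0] 1)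
      with hmF
    have hval : memoF.values = memoF.items.map (fun kv => kv.2) := rfl
    -- a cover made of all endpoints
    obtain ⟨kv0, hkv0, _⟩ := hex
      (PySem.Set.ofList (((p0, q0) :: rest).flatMap (fun e => [e.1, e.2])))
      (PySem.Set.nodup_ofList _)
      (by
        intro e he
        left
        rw [PySem.Set.mem_ofList]
        exact List.mem_flatMap.2 ⟨e, he, by simp⟩)
    have hmval : kv0.2 ∈ memoF.values := by
      rw [hval]; exact List.mem_map_of_mem hkv0
    cases hmin : PySem.List.min? memoF.values (fun v => v) with
    | none =>
      rw [PySem.List.min?_eq_none_iff] at hmin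
      rw [hmin] at hmval
      exact absurd hmval (List.not_mem_nil)
    | some m =>
      have hmmem := PySem.List.min?_mem hmin
      have hmin_le := PySem.List.min?_isMin hmin
      rw [hval] at hmmem
      obtain ⟨kvm, hkvm, hkvm2⟩ := List.mem_map.1 hmmem
      obtain ⟨hv1, hv2, hv3⟩ := hgood kvm hkvm
      have hub : mvcRec ((p0, q0) :: rest) [] ≤ (kvm.1.length : Int) :=
        mvc_le _ [] kvm.1 List.nodup_nil hv2 hv3 (List.nil_subset _)
      obtain ⟨C, hC1, _, hC3, hC4⟩ := mvc_exists ((p0, q0) :: rest) [] List.nodup_nil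
      obtain ⟨kv', hkv', hsub'⟩ := hex C hC1 hC3
      obtain ⟨hw1, hw2, _⟩ := hgood kv' hkv'
      have h5 : kv'.2 ∈ memoF.values := by rw [hval]; exact List.mem_map_of_mem hkv'
      have h6 : m ≤ kv'.2 := hmin_le _ h5
      have h7 : kv'.1.length ≤ C.length := nodup_length_le hw2 hsub'
      have hEmpty : mvcRec ((p0, q0) :: rest) PySem.Set.empty =
          mvcRec ((p0, q0) :: rest) [] := rfl
      rw [hEmpty]
      simp only [Option.getD_some]
      omega
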